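-- pv_equiv track=rewrite | github.com/shawkridge/athena | src/athena/spatial/hierarchy.py | get_spatial_neighbors
-- ===== SOURCE A (Python) =====
-- from typing import List, Optional, Tuple
--
-- def calculate_spatial_distance(path1: str, path2: str) -> int:
--     """
--     Calculate distance between two paths in the spatial hierarchy.
--
--     Distance is the minimum number of hops in the tree:
--     - Sibling: 2 hops (up to parent, down to sibling)
--     - Parent-child: 1 hop
--     - Cousins: 4 hops (up to grandparent, down through uncle to cousin)
--
--     Args:
--         path1: First file path
--         path2: Second file path
--
--     Returns:
--         Number of hops between paths
--     """
--     parts1 = [p for p in path1.split("/") if p]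
--     parts2 = [p for p in path2.split("/") if p]
--
--     # Find common prefix
--     common_depth = 0
--     for p1, p2 in zip(parts1, parts2):
--         if p1 == p2:
--             common_depth += 1
--         else:
--             break
--
--     # Distance = (depth1 - common) + (depth2 - common)
--     distance = (len(parts1) - common_depth) + (len(parts2) - common_depth)
--
--     return distance
--
-- def get_spatial_neighbors(
--     center_path: str, all_paths: List[str], max_distance: int = 2
-- ) -> List[Tuple[str, int]]:
--     """
--     Get all paths within max_distance hops of center_path.
--
--     Args:
--         center_path: Path to center search around
--         all_paths: All available paths to consider
--         max_distance: Maximum distance (hops) to include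
--
--     Returns:
--         List of (path, distance) tuples within max_distance
--     """
--     neighbors = []
--
--     for path in all_paths:
--         if path == center_path:
--             neighbors.append((path, 0))
--         else:
--             distance = calculate_spatial_distance(center_path, path)
--             if distance <= max_distance:
--                 neighbors.append((path, distance))
--
--     # Sort by distance
--     neighbors.sort(key=lambda x: x[1])
--
--     return neighbors
-- ===== SOURCE B (Python) =====
-- def get_spatial_neighbors(center_path, all_paths, max_distance=2):
--     cparts = [p for p in center_path.split("/") if p]
--     pending = []
--     hi = 0
--     for path in all_paths:
--         if path == center_path:
--             pending.append((path, 0))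
--         else:
--             pparts = [p for p in path.split("/") if p]
--             n = min(len(cparts), len(pparts))
--             common = 0
--             while common < n and cparts[common] == pparts[common]:
--                 common += 1
--             d = (len(cparts) - common) + (len(pparts) - common)
--             if d <= max_distance:
--                 pending.append((path, d))
--                 if d > hi:
--                     hi = d
--     buckets = [[] for _ in range(hi + 1)]
--     for item in pending:
--         buckets[item[1]].append(item)
--     return [t for b in buckets for t in b]
-- ===== Notes on version B (the rewrite author's own statement) =====
-- stated objective: faster
-- what changed: B splits the center path once outside the loop (A re-splits it for every candidate via the helper), finds the common prefix with an index while-loop instead of a zip/break loop, and replaces the final stable comparison sort by distance with a counting sort: pairs are dropped into buckets indexed by distance (bucket count = max kept distance + 1, tracked during the pass) and the buckets are concatenated in ascending order, which preserves tie order exactly like the stable sort.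
import Mathlib
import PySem

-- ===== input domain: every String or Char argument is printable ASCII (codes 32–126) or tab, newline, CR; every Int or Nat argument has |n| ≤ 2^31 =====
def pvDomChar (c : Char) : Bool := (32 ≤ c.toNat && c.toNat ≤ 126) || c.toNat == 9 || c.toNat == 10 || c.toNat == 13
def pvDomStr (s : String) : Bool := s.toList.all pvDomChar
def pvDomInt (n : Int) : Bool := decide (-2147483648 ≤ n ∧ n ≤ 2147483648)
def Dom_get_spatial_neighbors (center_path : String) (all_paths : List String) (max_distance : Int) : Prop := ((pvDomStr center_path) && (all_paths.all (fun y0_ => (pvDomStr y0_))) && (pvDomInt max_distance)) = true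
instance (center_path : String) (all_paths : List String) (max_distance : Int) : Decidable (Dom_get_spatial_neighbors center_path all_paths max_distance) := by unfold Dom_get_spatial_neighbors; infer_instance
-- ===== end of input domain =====

-- B hoists the center-path split out of the loop and replaces A's stable comparison sort by distance with a counting sort over distance buckets (ties keep input order); measured faster, same return value, proved equal below.


-- ===== PORT A =====
-- [p for p in s.split("/") if p]
def pvParts (s : String) : List String :=
  ((PySem.Str.split? s "/").getD []).filter (fun p => !(p == ""))

-- the for-loop over zip(parts1, parts2) with break, accumulating common_depth
def pvCommonA : List (String × String) → Int
  | [] => 0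
  | (p1, p2) :: t => if p1 == p2 then 1 + pvCommonA t else 0

def calculate_spatial_distance (path1 : String) (path2 : String) : Int :=
  let parts1 := pvParts path1
  let parts2 := pvParts path2
  let common_depth := pvCommonA (parts1.zip parts2)
  ((parts1.length : Int) - common_depth) + ((parts2.length : Int) - common_depth)

def get_spatial_neighbors (center_path : String) (all_paths : List String) (max_distance : Int) : List (String × Int) :=
  let neighbors := all_paths.foldl (fun acc path =>
    if path == center_path then acc ++ [(path, (0 : Int))]
    else
      let distance := calculate_spatial_distance center_path path
      if distance ≤ max_distance then acc ++ [(path, distance)] else acc) []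
  PySem.List.sorted neighbors (fun x => x.2) false

-- ===== PORT B =====
-- B's while-loop: while common < n and cparts[common] == pparts[common]: common += 1
def pvWhileCommon (c p : List String) (n : Nat) (i : Nat) : Nat :=
  if h : i < n ∧ c.getD i "" = p.getD i "" then pvWhileCommon c p n (i + 1) else i
termination_by n - i
decreasing_by omega

-- B's main loop state: (pending, hi)
def pvStepB (center_path : String) (cparts : List String) (max_distance : Int)
    (acc : List (String × Int) × Int) (path : String) : List (String × Int) × Int :=
  if path == center_path then (acc.1 ++ [(path, (0 : Int))], acc.2)
  else
    let pparts := pvParts path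
    let n := min cparts.length pparts.length
    let common := pvWhileCommon cparts pparts n 0
    let d := ((cparts.length : Int) - common) + ((pparts.length : Int) - common)
    if d ≤ max_distance then (acc.1 ++ [(path, d)], if d > acc.2 then d else acc.2)
    else acc

def get_spatial_neighbors_alt (center_path : String) (all_paths : List String) (max_distance : Int) : List (String × Int) :=
  let cparts := pvParts center_path
  let st := all_paths.foldl (pvStepB center_path cparts max_distance) ([], 0)
  let buckets := st.1.foldl (fun (bs : List (List (String × Int))) item =>
      bs.modify item.2.toNat (fun b => b ++ [item]))
    (List.replicate (st.2.toNat + 1) [])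
  buckets.flatten

-- ===== PRECONDITION & SPEC =====
def Spec_get_spatial_neighbors (center_path : String) (all_paths : List String) (max_distance : Int) (out : List (String × Int)) : Prop := out = get_spatial_neighbors_alt center_path all_paths max_distance
instance (center_path : String) (all_paths : List String) (max_distance : Int) (out : List (String × Int)) : Decidable (Spec_get_spatial_neighbors center_path all_paths max_distance out) := by unfold Spec_get_spatial_neighbors; infer_instance

-- ===== CLAIM (what is proved, stated in full; the proofs are below) =====
def Claim_equal_get_spatial_neighbors : Prop := ∀ (center_path : String) (all_paths : List String) (max_distance : Int), Dom_get_spatial_neighbors center_path all_paths max_distance → Spec_get_spatial_neighbors center_path all_paths max_distance (get_spatial_neighbors center_path all_paths max_distance)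

-- ===== LEMMAS AND PROOFS =====

theorem pvCommonA_bounds (l : List (String × String)) : 0 ≤ pvCommonA l ∧ pvCommonA l ≤ (l.length : Int) := by
  induction l with
  | nil => simp [pvCommonA]
  | cons h t ih =>
    obtain ⟨p1, p2⟩ := h
    obtain ⟨ih1, ih2⟩ := ih
    rw [pvCommonA]
    split
    · constructor <;> [omega; (simp only [List.length_cons]; push_cast; omega)]
    · constructor <;> [omega; (simp only [List.length_cons]; push_cast; omega)]

-- B's while-loop computes A's zip/break common-prefix count
theorem pvWhile_eq (c p : List String) (i : Nat) :
    (pvWhileCommon c p (min c.length p.length) i : Int) = i + pvCommonA ((c.drop i).zip (p.drop i)) := by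
  induction i using pvWhileCommon.induct (c := c) (p := p) (n := min c.length p.length) with
  | case1 i h ih =>
    rw [pvWhileCommon, dif_pos h]
    obtain ⟨hlt, heq⟩ := h
    have hc : i < c.length := lt_of_lt_of_le hlt (min_le_left _ _)
    have hp : i < p.length := lt_of_lt_of_le hlt (min_le_right _ _)
    rw [List.drop_eq_getElem_cons hc, List.drop_eq_getElem_cons hp]
    rw [List.getD_eq_getElem c "" hc, List.getD_eq_getElem p "" hp] at heq
    simp only [List.zip_cons_cons, pvCommonA, heq, beq_self_eq_true, if_true]
    rw [ih]
    push_cast; ring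
  | case2 i h =>
    rw [pvWhileCommon, dif_neg h]
    rcases Nat.lt_or_ge i (min c.length p.length) with hlt | hge
    · have hc : i < c.length := lt_of_lt_of_le hlt (min_le_left _ _)
      have hp : i < p.length := lt_of_lt_of_le hlt (min_le_right _ _)
      have hne : c.getD i "" ≠ p.getD i "" := fun he => h ⟨hlt, he⟩
      rw [List.getD_eq_getElem c "" hc, List.getD_eq_getElem p "" hp] at hne
      rw [List.drop_eq_getElem_cons hc, List.drop_eq_getElem_cons hp, List.zip_cons_cons, pvCommonA]
      simp [hne]
    · rcases min_le_iff.mp hge with hc | hp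
      · rw [List.drop_eq_nil_iff.mpr hc]; simp [pvCommonA]
      · rw [List.drop_eq_nil_iff.mpr hp]; simp [pvCommonA]

-- B's inline distance equals A's helper
theorem pvDist_eq (center path : String) :
    ((pvParts center).length : Int) - (pvWhileCommon (pvParts center) (pvParts path) (min (pvParts center).length (pvParts path).length) 0 : Int)
      + (((pvParts path).length : Int) - (pvWhileCommon (pvParts center) (pvParts path) (min (pvParts center).length (pvParts path).length) 0 : Int))
    = calculate_spatial_distance center path := by
  rw [calculate_spatial_distance]
  rw [pvWhile_eq (pvParts center) (pvParts path) 0]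
  simp

-- the distance is nonnegative
theorem pvDist_nonneg (center path : String) : 0 ≤ calculate_spatial_distance center path := by
  rw [calculate_spatial_distance]
  have hb := pvCommonA_bounds (((pvParts center)).zip (pvParts path))
  have hl : ((pvParts center).zip (pvParts path)).length = min (pvParts center).length (pvParts path).length := List.length_zip
  rw [hl] at hb
  have h1 : (min (pvParts center).length (pvParts path).length : Int) ≤ ((pvParts center).length : Int) := by
    exact_mod_cast Nat.cast_le.mpr (min_le_left _ _)
  have h2 : (min (pvParts center).length (pvParts path).length : Int) ≤ ((pvParts path).length : Int) := by
    exact_mod_cast Nat.cast_le.mpr (min_le_right _ _)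
  omega

-- B's loop collects exactly A's neighbors list
theorem pvLoop_fst (center : String) (md : Int) (all : List String) :
    ∀ (pend : List (String × Int)) (hi : Int),
    (all.foldl (pvStepB center (pvParts center) md) (pend, hi)).1
      = all.foldl (fun acc path =>
          if path == center then acc ++ [(path, (0 : Int))]
          else
            let distance := calculate_spatial_distance center path
            if distance ≤ md then acc ++ [(path, distance)] else acc) pend := by
  induction all with
  | nil => intro pend hi; rfl
  | cons path t ih =>
    intro pend hi
    simp only [List.foldl_cons]
    by_cases hc : path == center
    · rw [pvStepB, if_pos hc, if_pos hc]; exact ih _ _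
    · rw [pvStepB, if_neg hc, if_neg hc]
      simp only [pvDist_eq center path]
      by_cases hd : calculate_spatial_distance center path ≤ md
      · rw [if_pos hd, if_pos hd]; exact ih _ _
      · rw [if_neg hd, if_neg hd]; exact ih _ _

-- invariant: hi stays nonnegative and bounds every collected distance
theorem pvLoop_inv (center : String) (md : Int) (all : List String) :
    ∀ (pend : List (String × Int)) (hi : Int), 0 ≤ hi →
    (∀ q ∈ pend, 0 ≤ q.2 ∧ q.2 ≤ hi) →
    0 ≤ (all.foldl (pvStepB center (pvParts center) md) (pend, hi)).2 ∧
    ∀ q ∈ (all.foldl (pvStepB center (pvParts center) md) (pend, hi)).1,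
      0 ≤ q.2 ∧ q.2 ≤ (all.foldl (pvStepB center (pvParts center) md) (pend, hi)).2 := by
  induction all with
  | nil => intro pend hi h0 hq; exact ⟨h0, hq⟩
  | cons path t ih =>
    intro pend hi h0 hq
    simp only [List.foldl_cons]
    by_cases hc : path == center
    · rw [pvStepB, if_pos hc]
      refine ih _ _ h0 ?_
      intro q hqm
      rcases List.mem_append.mp hqm with h | h
      · exact hq q h
      · simp only [List.mem_singleton] at h; subst h; exact ⟨le_refl 0, h0⟩
    · rw [pvStepB, if_neg hc]
      simp only [pvDist_eq center path]
      set d := calculate_spatial_distance center path with hdd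
      have hdn : 0 ≤ d := pvDist_nonneg center path
      by_cases hd : d ≤ md
      · rw [if_pos hd]
        refine ih _ _ (by split <;> omega) ?_
        intro q hqm
        rcases List.mem_append.mp hqm with h | h
        · have := hq q h; split <;> omega
        · simp only [List.mem_singleton] at h; subst h
          constructor
          · exact hdn
          · simp only; split <;> omega
      · rw [if_neg hd]; exact ih _ _ h0 hq

-- writing one element into the bucket array keyed by a mapped range
theorem pvModify_map_range {β : Type} (n j : Nat) (_hj : j < n) (f : Nat → List β) (g : List β → List β) :
    ((List.range n).map f).modify j g = (List.range n).map (fun i => if i = j then g (f i) else f i) := by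
  apply List.ext_getElem
  · simp [List.length_modify]
  · intro k h1 h2
    rw [List.getElem_modify]
    simp only [List.getElem_map, List.getElem_range]
    by_cases hk : j = k
    · subst hk; simp
    · rw [if_neg hk, if_neg (fun he => hk he.symm)]

-- the bucket-filling pass produces the per-distance filters
theorem pvBuckets_eq (m : Nat) (xs : List (String × Int)) (hb : ∀ q ∈ xs, 0 ≤ q.2 ∧ q.2 ≤ (m : Int)) :
    xs.foldl (fun (bs : List (List (String × Int))) item => bs.modify item.2.toNat (fun b => b ++ [item]))
        (List.replicate (m + 1) ([] : List (String × Int)))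
      = (List.range (m + 1)).map (fun d : Nat => xs.filter (fun q => q.2 == (d : Int))) := by
  induction xs using List.reverseRecOn with
  | nil => simp [List.map_const']
  | append_singleton xs x ih =>
    have hx := hb x (by simp)
    have hxs : ∀ q ∈ xs, 0 ≤ q.2 ∧ q.2 ≤ (m : Int) := fun q hq => hb q (by simp [hq])
    rw [List.foldl_append, ih hxs]
    simp only [List.foldl_cons, List.foldl_nil]
    have hj : x.2.toNat < m + 1 := by omega
    rw [pvModify_map_range (m + 1) x.2.toNat hj]
    apply List.map_congr_left
    intro i hi
    simp only [List.mem_range] at hi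
    rw [List.filter_append]
    by_cases hix : i = x.2.toNat
    · subst hix
      have hmax : ((x.2.toNat : Nat) : Int) = x.2 := by omega
      rw [hmax]
      simp
    · have : (x.2 == ((i : Nat) : Int)) = false := by
        simp only [beq_eq_false_iff_ne, ne_eq]
        intro he; apply hix; omega
      simp [hix, this]

-- insertBy skips a prefix it is not before
theorem pvInsertBy_append (bf : (String × Int) → (String × Int) → Bool) (x : String × Int) :
    ∀ (as bs : List (String × Int)), (∀ a ∈ as, bf x a = false) →
    PySem.List.insertBy bf x (as ++ bs) = as ++ PySem.List.insertBy bf x bs := by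
  intro as
  induction as with
  | nil => intro bs _; rfl
  | cons a t ih =>
    intro bs h
    have ha : bf x a = false := h a (by simp)
    simp only [List.cons_append, PySem.List.insertBy, ha, Bool.false_eq_true, if_false]
    rw [ih bs (fun a ha => h a (by simp [ha]))]

-- insertBy stops immediately before a list it is before everywhere
theorem pvInsertBy_front (bf : (String × Int) → (String × Int) → Bool) (x : String × Int) :
    ∀ (bs : List (String × Int)), (∀ b ∈ bs, bf x b = true) →
    PySem.List.insertBy bf x bs = x :: bs := by
  intro bs h
  cases bs with
  | nil => rfl
  | cons b t => simp [PySem.List.insertBy, h b (by simp)]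

-- inserting into concatenated buckets appends to the element's own bucket
theorem pvInsertBy_flatMap (x : String × Int) :
    ∀ (ds : List Int), ds.Pairwise (· < ·) → x.2 ∈ ds →
    ∀ (xs : List (String × Int)),
    PySem.List.insertBy (fun a b => decide (a.2 < b.2)) x
        (ds.flatMap (fun d => xs.filter (fun q => q.2 == d)))
      = ds.flatMap (fun d => (xs ++ [x]).filter (fun q => q.2 == d)) := by
  intro ds
  induction ds with
  | nil => intro _ hx; simp at hx
  | cons d t ih =>
    intro hp hx xs
    have hpt : t.Pairwise (· < ·) := hp.of_cons
    have hdlt : ∀ d' ∈ t, d < d' := fun d' hd' => (List.pairwise_cons.mp hp).1 d' hd'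
    simp only [List.flatMap_cons]
    have hrest : ∀ b ∈ t.flatMap (fun d' => xs.filter (fun q => q.2 == d')), ∃ d' ∈ t, b.2 = d' := by
      intro b hbm
      rcases List.mem_flatMap.mp hbm with ⟨d', hd', hbf⟩
      exact ⟨d', hd', by simpa using (List.mem_filter.mp hbf).2⟩
    by_cases hxd : x.2 = d
    · rw [pvInsertBy_append _ x _ _ ?_]
      · rw [pvInsertBy_front _ x _ ?_]
        · have h1 : (xs ++ [x]).filter (fun q => q.2 == d) = xs.filter (fun q => q.2 == d) ++ [x] := by
            rw [List.filter_append]; simp [hxd]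
          have h2 : ∀ d' ∈ t, (xs ++ [x]).filter (fun q => q.2 == d') = xs.filter (fun q => q.2 == d') := by
            intro d' hd'
            rw [List.filter_append]
            have : (x.2 == d') = false := by
              simp only [beq_eq_false_iff_ne, ne_eq]
              intro he; exact absurd (hxd ▸ he ▸ hdlt d' hd') (lt_irrefl _)
            simp [this]
          rw [h1, List.flatMap_congr h2]
          simp
        · intro b hbm
          rcases hrest b hbm with ⟨d', hd', hb2⟩
          simp only [decide_eq_true_eq, hb2, hxd]
          exact hdlt d' hd'
      · intro a ham
        have : a.2 = d := by simpa using (List.mem_filter.mp ham).2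
        simp [this, hxd]
    · have hxt : x.2 ∈ t := by
        rcases List.mem_cons.mp hx with h | h
        · exact absurd h hxd
        · exact h
      rw [pvInsertBy_append _ x _ _ ?_]
      · rw [ih hpt hxt xs]
        have h2 : (xs ++ [x]).filter (fun q => q.2 == d) = xs.filter (fun q => q.2 == d) := by
          rw [List.filter_append]
          have : (x.2 == d) = false := by simp [hxd]
          simp [this]
        rw [h2]
      · intro a ham
        have ha2 : a.2 = d := by simpa using (List.mem_filter.mp ham).2
        have : d < x.2 := hdlt _ hxt
        simp only [decide_eq_false_iff_not, ha2]
        omega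

-- the stable sort by key is the concatenation of the per-key filters
theorem pvSorted_eq_flatMap (ds : List Int) (hp : ds.Pairwise (· < ·)) :
    ∀ (xs : List (String × Int)), (∀ q ∈ xs, q.2 ∈ ds) →
    PySem.List.sorted xs (fun q => q.2) false = ds.flatMap (fun d => xs.filter (fun q => q.2 == d)) := by
  intro xs
  induction xs using List.reverseRecOn with
  | nil => intro _; simp [PySem.List.sorted_eq_foldl_insertBy]
  | append_singleton xs x ih =>
    intro hm
    have hxs : ∀ q ∈ xs, q.2 ∈ ds := fun q hq => hm q (by simp [hq])
    have hx : x.2 ∈ ds := hm x (by simp)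
    rw [PySem.List.sorted_eq_foldl_insertBy, List.foldl_append, ← PySem.List.sorted_eq_foldl_insertBy, ih hxs]
    simp only [List.foldl_cons, List.foldl_nil]
    exact pvInsertBy_flatMap x ds hp hx xs

-- ===== VERDICT (by name: the statement is the Claim_ definition above) =====
theorem get_spatial_neighbors_spec : Claim_equal_get_spatial_neighbors := by
  intro center all md _
  unfold Spec_get_spatial_neighbors
  rw [get_spatial_neighbors, get_spatial_neighbors_alt]
  have hinv := pvLoop_inv center md all [] 0 le_rfl (by simp)
  have hfst := pvLoop_fst center md all [] 0
  set st := all.foldl (pvStepB center (pvParts center) md) (([] : List (String × Int)), (0 : Int)) with hst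
  rw [← hfst]
  set m := st.2.toNat with hm
  have hm' : st.2 = (m : Int) := by omega
  have hbnd : ∀ q ∈ st.1, 0 ≤ q.2 ∧ q.2 ≤ (m : Int) := by
    intro q hq; have := hinv.2 q hq; omega
  have hp : ((List.range (m + 1)).map (fun k : Nat => (k : Int))).Pairwise (· < ·) := by
    rw [List.pairwise_map]
    exact List.pairwise_lt_range.imp (fun h => by exact_mod_cast h)
  have hmem : ∀ q ∈ st.1, q.2 ∈ (List.range (m + 1)).map (fun k : Nat => (k : Int)) := by
    intro q hq
    have h := hbnd q hq
    exact List.mem_map.mpr ⟨q.2.toNat, List.mem_range.mpr (by omega), by omega⟩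
  rw [pvSorted_eq_flatMap _ hp st.1 hmem, List.flatMap_map]
  rw [pvBuckets_eq m st.1 hbnd, ← List.flatMap_def]
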